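-- pv_equiv track=rewrite | github.com/EvgenyBaulin/Python_for_Krotova_Maria | Homework 5/Task 6.py | possible_numbers
-- ===== SOURCE A (Python) =====
-- def possible_numbers(n, questions):
-- 	possible = set(range(1, n + 1))
--
-- 	for i in range(0, len(questions), 2):
-- 		question_set = set(map(int, questions[i].split()))
-- 		answer = questions[i + 1]
--
-- 		if answer == "YES":
-- 			possible &= question_set
-- 		else:
-- 			possible -= question_set
--
-- 	return sorted(possible)
-- ===== SOURCE B (Python) =====
-- def possible_numbers(n, questions):
--     parsed = [(set(map(int, questions[i].split())), questions[i + 1] == "YES")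
--               for i in range(0, len(questions), 2)]
--     return [x for x in range(1, n + 1)
--             if all((x in qs) == yes for qs, yes in parsed)]
-- ===== Notes on version B (the rewrite author's own statement) =====
-- stated objective: alternative
-- what changed: Instead of mutating a running set with &=/-= per question pair, B parses all (set, answer) pairs once and builds the result by filtering the ascending range 1..n with an all(...) membership test per candidate, so no final sort is needed.
import Mathlib
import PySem

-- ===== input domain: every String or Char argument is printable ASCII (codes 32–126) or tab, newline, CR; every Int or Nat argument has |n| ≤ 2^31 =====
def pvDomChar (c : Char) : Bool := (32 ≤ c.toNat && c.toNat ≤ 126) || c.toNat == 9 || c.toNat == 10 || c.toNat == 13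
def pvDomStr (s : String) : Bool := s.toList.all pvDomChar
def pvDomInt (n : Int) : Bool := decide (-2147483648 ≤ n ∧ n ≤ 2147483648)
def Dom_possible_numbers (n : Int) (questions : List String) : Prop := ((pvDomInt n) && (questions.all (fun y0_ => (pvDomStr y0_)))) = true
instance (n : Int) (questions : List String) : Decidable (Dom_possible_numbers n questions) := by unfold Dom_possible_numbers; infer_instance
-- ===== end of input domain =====

-- B replaces A's running set intersections/differences by parsing the question pairs once
-- and filtering the ascending range 1..n with a per-candidate all(...) membership test (objective: alternative).

-- ===== PORT A =====
def possible_numbers (n : Int) (questions : List String) : List Int :=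
  let possible : PySem.Set Int := PySem.Set.ofList (PySem.List.pyRange 1 (n + 1) 1)
  let possible :=
    (PySem.List.pyRange 0 questions.length 2).foldl (fun poss i =>
      let question_set : PySem.Set Int :=
        PySem.Set.ofList ((PySem.Str.split₀ (PySem.List.pyGetD questions i "")).map
          (fun t => (PySem.Int.ofStr? t).getD 0))
      let answer := PySem.List.pyGetD questions (i + 1) ""
      if answer = "YES" then PySem.Set.inter poss question_set
      else PySem.Set.diff poss question_set) possible
  PySem.List.sorted possible (fun x => x) false

-- ===== PORT B =====
def possible_numbers_alt (n : Int) (questions : List String) : List Int :=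
  let parsed : List (PySem.Set Int × Bool) :=
    (PySem.List.pyRange 0 questions.length 2).map (fun i =>
      (PySem.Set.ofList ((PySem.Str.split₀ (PySem.List.pyGetD questions i "")).map
          (fun t => (PySem.Int.ofStr? t).getD 0)),
       PySem.List.pyGetD questions (i + 1) "" == "YES"))
  (PySem.List.pyRange 1 (n + 1) 1).filter
    (fun x => parsed.all (fun p => PySem.Set.contains p.1 x == p.2))

-- ===== PRECONDITION & SPEC =====
-- Pre_ excludes exactly the inputs on which A raises: an odd-length question list
-- (IndexError on questions[i + 1]) and even-indexed questions with a token int() rejects (ValueError).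
def Pre_possible_numbers (n : Int) (questions : List String) : Prop :=
  questions.length % 2 = 0 ∧
  ∀ k ∈ List.range questions.length, k % 2 = 0 →
    ∀ tok ∈ PySem.Str.split₀ (questions.getD k ""), (PySem.Int.ofStr? tok).isSome = true
instance (n : Int) (questions : List String) : Decidable (Pre_possible_numbers n questions) := by
  unfold Pre_possible_numbers; infer_instance

def pvWitness_possible_numbers : Int × List String := (5, ["1 2 3", "YES", "2", "NO"])

def Spec_possible_numbers (n : Int) (questions : List String) (out : List Int) : Prop := out = possible_numbers_alt n questions
instance (n : Int) (questions : List String) (out : List Int) : Decidable (Spec_possible_numbers n questions out) := by unfold Spec_possible_numbers; infer_instance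

-- ===== CLAIM (what is proved, stated in full; the proofs are below) =====
def Claim_equal_possible_numbers : Prop := ∀ (n : Int) (questions : List String), Dom_possible_numbers n questions → Pre_possible_numbers n questions → Spec_possible_numbers n questions (possible_numbers n questions)

-- ===== LEMMAS AND PROOFS =====

-- A's chain of &= / -= over any (set, answer) list is one filter by the combined membership test.
theorem foldl_interdiff (L : List (PySem.Set Int × Bool)) (poss : List Int) :
    L.foldl (fun s p => if p.2 = true then PySem.Set.inter s p.1 else PySem.Set.diff s p.1) poss
      = poss.filter (fun x => L.all (fun p => PySem.Set.contains p.1 x == p.2)) := by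
  induction L generalizing poss with
  | nil => simp
  | cons p L ih =>
    simp only [List.foldl_cons, List.all_cons, ih]
    by_cases hp : p.2 = true
    · rw [if_pos hp,
        show PySem.Set.inter poss p.1 = poss.filter (fun x => PySem.Set.contains p.1 x) from rfl,
        List.filter_filter]
      exact List.filter_congr (fun x _ => by simp [hp, Bool.and_comm])
    · rw [if_neg hp,
        show PySem.Set.diff poss p.1 = poss.filter (fun x => !PySem.Set.contains p.1 x) from rfl,
        List.filter_filter]
      rw [Bool.not_eq_true] at hp
      exact List.filter_congr (fun x _ => by simp [hp, Bool.and_comm])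

theorem possible_numbers_eq_filter (n : Int) (questions : List String) :
    possible_numbers n questions = possible_numbers_alt n questions := by
  unfold possible_numbers possible_numbers_alt
  dsimp only
  rw [PySem.Set.ofList_eq_self_of_nodup _ (PySem.List.nodup_pyRange_one 1 (n + 1))]
  have hcong :
      (PySem.List.pyRange 0 (questions.length) 2).foldl
        (fun poss i =>
          let question_set : PySem.Set Int :=
            PySem.Set.ofList ((PySem.Str.split₀ (PySem.List.pyGetD questions i "")).map
              (fun t => (PySem.Int.ofStr? t).getD 0))
          let answer := PySem.List.pyGetD questions (i + 1) ""
          if answer = "YES" then PySem.Set.inter poss question_set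
          else PySem.Set.diff poss question_set)
        (PySem.List.pyRange 1 (n + 1) 1)
      = ((PySem.List.pyRange 0 (questions.length) 2).map (fun i =>
            (PySem.Set.ofList ((PySem.Str.split₀ (PySem.List.pyGetD questions i "")).map
              (fun t => (PySem.Int.ofStr? t).getD 0)),
             PySem.List.pyGetD questions (i + 1) "" == "YES"))).foldl
          (fun s p => if p.2 = true then PySem.Set.inter s p.1 else PySem.Set.diff s p.1)
          (PySem.List.pyRange 1 (n + 1) 1) := by
    rw [List.foldl_map]
    apply PySem.List.foldl_congr_mem
    intro acc i _
    simp only [beq_iff_eq]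
  rw [hcong, foldl_interdiff]
  apply PySem.List.sorted_eq_self_of_pairwise
  exact ((PySem.List.pairwise_lt_pyRange_one 1 (n + 1)).sublist
    List.filter_sublist).imp (fun h => le_of_lt h)

-- ===== VERDICT (by name: the statement is the Claim_ definition above) =====
theorem possible_numbers_spec : Claim_equal_possible_numbers := by
  intro n questions _ _
  exact possible_numbers_eq_filter n questions
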